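-- pv_equiv track=rewrite | github.com/ThomasGeorgeP/CodeChef_Entry | 5.potato.py | calc_blocks
-- ===== SOURCE A (Python) =====
-- def break_apart(size: list):
--     size.sort()
--     #remaining cube splits up into two pieces
--     new_size1=[size[0],size[0],size[1]-size[0]]#smaller chunk
--     new_size2=[size[0],size[1],size[2]-size[0]]#bigger chunk
--     return new_size1,new_size2
--
-- def calc_blocks(size: list):
--     size.sort()
--     #biggest cube is size[0],size[0],size[0]
--
--     if 0 in size:#no cubes can be formed
--         return 0
--     elif 1 in size:#kind of a plane
--         return size[1]*size[2]
--     else: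
--         smaller_chunk,larger_chunk=break_apart(size)
--         return calc_blocks(smaller_chunk)+calc_blocks(larger_chunk)+1
-- ===== SOURCE B (Python) =====
-- # Faster exact re-implementation: batches each whole phase in which the minimum
-- # side stays the cube size into one closed-form quotient/residue formula
-- # (floor divisions instead of one-cube-at-a-time subtraction chains), and
-- # memoizes results per sorted triple.  Like A, calc_blocks sorts its list
-- # argument in place.
--
-- def _fast(x, y, z, memo):
--     # greedy cube count of the box with sides sorted((x, y, z)), all >= 0
--     a, b, c = sorted((x, y, z))
--     key = (a, b, c)
--     if key in memo:
--         return memo[key]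
--     if a == 0:
--         r = 0
--     elif a == 1:
--         r = b * c
--     else:
--         qb, eb = divmod(b, a)
--         qc, ec = divmod(c, a)
--         if qc == 1:
--             # both b and c lie in [a, 2a): one greedy cut, then the minimum
--             # side shrinks below a
--             r = 1 + _fast(b - a, a, a, memo) + _fast(c - a, a, b, memo)
--         else:
--             # phase with cube side a batched: qb*qc - 1 cubes of side a are
--             # cut, next to qc - 1 slabs (eb, a, a), qb - 1 slabs (ec, a, a),
--             # and the phase ends at the box (a, a + min(eb,ec), a + max(eb,ec))
--             r = (qb * qc - 1
--                  + (qc - 1) * _fast(eb, a, a, memo)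
--                  + (qb - 1) * _fast(ec, a, a, memo)
--                  + _fast(a, a + min(eb, ec), a + max(eb, ec), memo))
--     memo[key] = r
--     return r
--
-- def calc_blocks(size: list):
--     size.sort()
--     if 0 in size:
--         return 0
--     return _fast(size[0], size[1], size[2], {})
-- ===== Notes on version B (the rewrite author's own statement) =====
-- stated objective: faster
-- what changed: A cuts one greedy cube per recursive call (a subtraction chain per dimension, pseudo-polynomial in the side lengths); B batches each whole phase in which the minimum side stays the cube size into a closed-form quotient/residue formula (floor divisions replace the subtraction chains) and memoizes results per sorted triple.
-- outside the precondition, e.g. on calc_blocks([-2, 1, 3]): A returns 3, B does not finish within the time limit; on calc_blocks([5, 7]): A raises IndexError, B raises IndexError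
import Mathlib
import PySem

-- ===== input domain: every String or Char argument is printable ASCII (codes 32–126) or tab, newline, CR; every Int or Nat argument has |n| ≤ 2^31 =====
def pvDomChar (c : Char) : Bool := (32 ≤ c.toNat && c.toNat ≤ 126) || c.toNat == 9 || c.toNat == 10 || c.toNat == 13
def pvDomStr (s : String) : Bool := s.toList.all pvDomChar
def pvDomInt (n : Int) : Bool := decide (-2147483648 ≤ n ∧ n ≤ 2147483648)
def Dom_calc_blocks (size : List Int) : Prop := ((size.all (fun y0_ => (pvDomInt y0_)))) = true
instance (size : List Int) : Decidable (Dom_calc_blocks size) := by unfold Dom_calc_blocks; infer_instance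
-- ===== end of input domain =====

-- B replaces A's one-cube-per-recursive-step dissection by batched phases
-- (closed-form quotient/residue formula per phase) plus memoization on sorted
-- triples (objective: faster).  Both A and B sort their list argument in place;
-- the equivalence proved here is about the return value.

-- shared helper: size[i] (Python raises IndexError out of range; rendered total
-- with default 0 — Pre_ excludes every input on which such an access is reached)
def pvPg (l : List Int) (i : Int) : Int := (PySem.List.pyGet? l i).getD 0

-- ----- helper lemmas cited by the ports' termination proofs -----
theorem pvPg0 (x : Int) (l : List Int) : pvPg (x :: l) 0 = x := by simp [pvPg]

theorem pvPg1 (x y : Int) (l : List Int) : pvPg (x :: y :: l) 1 = y := by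
  have h : PySem.List.pyGet? (x :: y :: l) ((1 : Nat) : Int) = (x :: y :: l)[(1:Nat)]? :=
    PySem.List.pyGet?_natCast _ _
  simpa [pvPg] using congrArg (Option.getD · 0) h

theorem pvPg2 (x y z : Int) (l : List Int) : pvPg (x :: y :: z :: l) 2 = z := by
  have h : PySem.List.pyGet? (x :: y :: z :: l) ((2 : Nat) : Int) = (x :: y :: z :: l)[(2:Nat)]? :=
    PySem.List.pyGet?_natCast _ _
  simpa [pvPg] using congrArg (Option.getD · 0) h

theorem pvMu3 (x y z : Int) :
    ((PySem.List.sorted [x, y, z] (fun v => v)).map Int.toNat).sum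
      = x.toNat + y.toNat + z.toNat := by
  have h := ((PySem.List.sorted_perm [x, y, z] (fun v => v) false).map Int.toNat).sum_eq
  simp at h; omega

theorem pvMuGe (l : List Int) :
    (pvPg l 0).toNat + (pvPg l 1).toNat + (pvPg l 2).toNat ≤ (l.map Int.toNat).sum := by
  match l with
  | [] => simp [pvPg, PySem.List.pyGet?, PySem.List.pyIdx?]
  | [x] => simp [pvPg, PySem.List.pyGet?, PySem.List.pyIdx?]
  | [x, y] => simp [pvPg, PySem.List.pyGet?, PySem.List.pyIdx?]
  | x :: y :: z :: t => simp [pvPg0, pvPg1, pvPg2]; omega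

-- break_apart(size): size.sort(); the two chunks the box splits into
def break_apart (size : List Int) : List Int × List Int :=
  let s := PySem.List.sorted size (fun v => v)
  ([pvPg s 0, pvPg s 0, pvPg s 1 - pvPg s 0],
   [pvPg s 0, pvPg s 1, pvPg s 2 - pvPg s 0])

theorem pvSumLt3 (u1 u2 u3 v1 v2 v3 : Int)
    (h1 : 0 ≤ u1) (h2 : 0 ≤ u2) (h3 : 0 ≤ u3) (h4 : 0 ≤ v1) (h5 : 0 ≤ v2) (h6 : 0 ≤ v3)
    (h : u1 + u2 + u3 < v1 + v2 + v3) :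
    u1.toNat + u2.toNat + u3.toNat < v1.toNat + v2.toNat + v3.toNat := by
  rw [← Int.toNat_add h1 h2, ← Int.toNat_add (add_nonneg h1 h2) h3,
      ← Int.toNat_add h4 h5, ← Int.toNat_add (add_nonneg h4 h5) h6]
  exact (Int.toNat_lt_toNat (lt_of_le_of_lt (add_nonneg (add_nonneg h1 h2) h3) h)).mpr h

theorem pvDecA1 (size : List Int)
    (h : 2 ≤ pvPg (PySem.List.sorted size (fun v => v)) 0 ∧
      pvPg (PySem.List.sorted size (fun v => v)) 0 ≤ pvPg (PySem.List.sorted size (fun v => v)) 1 ∧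
      pvPg (PySem.List.sorted size (fun v => v)) 1 ≤ pvPg (PySem.List.sorted size (fun v => v)) 2) :
    ((PySem.List.sorted (break_apart (PySem.List.sorted size (fun v => v))).1 (fun v => v)).map Int.toNat).sum
      < ((PySem.List.sorted size (fun v => v)).map Int.toNat).sum := by
  simp only [break_apart, PySem.List.sorted_sorted]
  rw [pvMu3]
  refine Nat.lt_of_lt_of_le
    (pvSumLt3 _ _ _ _ _ _ (by omega) (by omega) (by omega) (by omega) (by omega) (by omega)
      (by omega)) (pvMuGe (PySem.List.sorted size (fun v => v)))

theorem pvDecA2 (size : List Int)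
    (h : 2 ≤ pvPg (PySem.List.sorted size (fun v => v)) 0 ∧
      pvPg (PySem.List.sorted size (fun v => v)) 0 ≤ pvPg (PySem.List.sorted size (fun v => v)) 1 ∧
      pvPg (PySem.List.sorted size (fun v => v)) 1 ≤ pvPg (PySem.List.sorted size (fun v => v)) 2) :
    ((PySem.List.sorted (break_apart (PySem.List.sorted size (fun v => v))).2 (fun v => v)).map Int.toNat).sum
      < ((PySem.List.sorted size (fun v => v)).map Int.toNat).sum := by
  simp only [break_apart, PySem.List.sorted_sorted]
  rw [pvMu3]
  refine Nat.lt_of_lt_of_le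
    (pvSumLt3 _ _ _ _ _ _ (by omega) (by omega) (by omega) (by omega) (by omega) (by omega)
      (by omega)) (pvMuGe (PySem.List.sorted size (fun v => v)))

-- ===== PORT A =====
-- calc_blocks(size): size.sort(); 0 in size / 1 in size checks, else recurse on
-- the two chunks.  (Python's sorted `size` is written out inline each time.)
def calc_blocks (size : List Int) : Int :=
  if (0 : Int) ∈ PySem.List.sorted size (fun v => v) then 0
  else if (1 : Int) ∈ PySem.List.sorted size (fun v => v) then
    pvPg (PySem.List.sorted size (fun v => v)) 1 * pvPg (PySem.List.sorted size (fun v => v)) 2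
  else
    -- totality guard only: it holds on every input admitted by Pre_ that reaches
    -- this branch; outside Pre_ the Python recurses without bound
    if h : 2 ≤ pvPg (PySem.List.sorted size (fun v => v)) 0 ∧
        pvPg (PySem.List.sorted size (fun v => v)) 0 ≤ pvPg (PySem.List.sorted size (fun v => v)) 1 ∧
        pvPg (PySem.List.sorted size (fun v => v)) 1 ≤ pvPg (PySem.List.sorted size (fun v => v)) 2 then
      calc_blocks (break_apart (PySem.List.sorted size (fun v => v))).1 +
        calc_blocks (break_apart (PySem.List.sorted size (fun v => v))).2 + 1
    else 0
termination_by ((PySem.List.sorted size (fun v => v)).map Int.toNat).sum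
decreasing_by
  · exact pvDecA1 size h
  · exact pvDecA2 size h

theorem pvDecB0 (x y z a b c : Int)
    (hs : PySem.List.sorted [x, y, z] (fun v => v) = [a, b, c]) :
    a.toNat + b.toNat + c.toNat = x.toNat + y.toNat + z.toNat := by
  have hmu := pvMu3 x y z
  rw [hs] at hmu
  simp at hmu
  omega

theorem pvDecB1 (x y z a b c : Int)
    (hs : PySem.List.sorted [x, y, z] (fun v => v) = [a, b, c])
    (hg : 2 ≤ a ∧ a ≤ b ∧ b ≤ c) :
    (b - a).toNat + a.toNat + a.toNat < x.toNat + y.toNat + z.toNat := by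
  rw [← pvDecB0 x y z a b c hs]
  exact pvSumLt3 _ _ _ _ _ _ (by omega) (by omega) (by omega) (by omega) (by omega) (by omega)
    (by omega)

theorem pvDecB2 (x y z a b c : Int)
    (hs : PySem.List.sorted [x, y, z] (fun v => v) = [a, b, c])
    (hg : 2 ≤ a ∧ a ≤ b ∧ b ≤ c) :
    (c - a).toNat + a.toNat + b.toNat < x.toNat + y.toNat + z.toNat := by
  rw [← pvDecB0 x y z a b c hs]
  exact pvSumLt3 _ _ _ _ _ _ (by omega) (by omega) (by omega) (by omega) (by omega) (by omega)
    (by omega)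

theorem pvDecBFacts (a b c : Int) (hg : 2 ≤ a ∧ a ≤ b ∧ b ≤ c)
    (hq : ¬ PySem.Int.floordiv c a = 1) :
    0 ≤ PySem.Int.mod b a ∧ PySem.Int.mod b a < a ∧
    0 ≤ PySem.Int.mod c a ∧ PySem.Int.mod c a < a ∧
    a + PySem.Int.mod b a ≤ b ∧ 2 * a + PySem.Int.mod c a ≤ c := by
  have ha : (0 : Int) < a := by omega
  have hbm1 := Int.emod_nonneg b (by omega : a ≠ 0)
  have hbm2 := Int.emod_lt_of_pos b ha
  have hcm1 := Int.emod_nonneg c (by omega : a ≠ 0)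
  have hcm2 := Int.emod_lt_of_pos c ha
  have hbd := Int.mul_ediv_add_emod b a
  have hcd := Int.mul_ediv_add_emod c a
  have hb1 : (1 : Int) ≤ b / a := by rw [Int.le_ediv_iff_mul_le ha]; omega
  have hc1 : (1 : Int) ≤ c / a := by rw [Int.le_ediv_iff_mul_le ha]; omega
  have hq' : ¬ c / a = 1 := by rw [← PySem.Int.floordiv_eq_ediv_of_pos ha]; exact hq
  have hq2 : (2 : Int) ≤ c / a := by omega
  have hca : a * 2 ≤ a * (c / a) := mul_le_mul_of_nonneg_left hq2 (le_of_lt ha)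
  have hba : a * 1 ≤ a * (b / a) := mul_le_mul_of_nonneg_left hb1 (le_of_lt ha)
  simp only [PySem.Int.mod_eq_emod_of_pos ha]
  omega

theorem pvDecB3 (x y z a b c : Int)
    (hs : PySem.List.sorted [x, y, z] (fun v => v) = [a, b, c])
    (hg : 2 ≤ a ∧ a ≤ b ∧ b ≤ c) (hq : ¬ PySem.Int.floordiv c a = 1) :
    (PySem.Int.mod b a).toNat + a.toNat + a.toNat < x.toNat + y.toNat + z.toNat := by
  have hf := pvDecBFacts a b c hg hq
  rw [← pvDecB0 x y z a b c hs]
  exact pvSumLt3 _ _ _ _ _ _ (by omega) (by omega) (by omega) (by omega) (by omega) (by omega)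
    (by omega)

theorem pvDecB4 (x y z a b c : Int)
    (hs : PySem.List.sorted [x, y, z] (fun v => v) = [a, b, c])
    (hg : 2 ≤ a ∧ a ≤ b ∧ b ≤ c) (hq : ¬ PySem.Int.floordiv c a = 1) :
    (PySem.Int.mod c a).toNat + a.toNat + a.toNat < x.toNat + y.toNat + z.toNat := by
  have hf := pvDecBFacts a b c hg hq
  rw [← pvDecB0 x y z a b c hs]
  exact pvSumLt3 _ _ _ _ _ _ (by omega) (by omega) (by omega) (by omega) (by omega) (by omega)
    (by omega)

theorem pvDecB5 (x y z a b c : Int)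
    (hs : PySem.List.sorted [x, y, z] (fun v => v) = [a, b, c])
    (hg : 2 ≤ a ∧ a ≤ b ∧ b ≤ c) (hq : ¬ PySem.Int.floordiv c a = 1) :
    a.toNat + (a + min (PySem.Int.mod b a) (PySem.Int.mod c a)).toNat
        + (a + max (PySem.Int.mod b a) (PySem.Int.mod c a)).toNat
      < x.toNat + y.toNat + z.toNat := by
  have hf := pvDecBFacts a b c hg hq
  have hmm := min_add_max (PySem.Int.mod b a) (PySem.Int.mod c a)
  have hminn : 0 ≤ min (PySem.Int.mod b a) (PySem.Int.mod c a) :=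
    le_min (by omega) (by omega)
  rw [← pvDecB0 x y z a b c hs]
  exact pvSumLt3 _ _ _ _ _ _ (by omega) (by omega) (by omega) (by omega) (by omega) (by omega)
    (by omega)

-- ===== PORT B =====
-- _fast(x, y, z, memo) of Source B: `a, b, c = sorted((x, y, z))` is the match
-- (its catch-all is unreachable: sorted keeps the length); the Python mutates
-- the shared dict, the port threads it in the same sequential order
def pvFast (x y z : Int) (memo : PySem.Dict (Int × Int × Int) Int) :
    Int × PySem.Dict (Int × Int × Int) Int :=
  match hs : PySem.List.sorted [x, y, z] (fun v => v) with
  | [a, b, c] =>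
    (match memo.get? (a, b, c) with
    | some v => (v, memo)
    | none =>
      let rm : Int × PySem.Dict (Int × Int × Int) Int :=
        if a = 0 then (0, memo)
        else if a = 1 then (b * c, memo)
        else
          -- totality guard only: it holds whenever this branch is reached from
          -- an input admitted by Pre_; outside Pre_ the Python recurses forever
          if hg : 2 ≤ a ∧ a ≤ b ∧ b ≤ c then
            let qb := PySem.Int.floordiv b a
            let eb := PySem.Int.mod b a
            let qc := PySem.Int.floordiv c a
            let ec := PySem.Int.mod c a
            if hq : qc = 1 then
              let r1m := pvFast (b - a) a a memo
              let r2m := pvFast (c - a) a b r1m.2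
              (1 + r1m.1 + r2m.1, r2m.2)
            else
              let r1m := pvFast eb a a memo
              let r2m := pvFast ec a a r1m.2
              let r3m := pvFast a (a + min eb ec) (a + max eb ec) r2m.2
              (qb * qc - 1 + (qc - 1) * r1m.1 + (qb - 1) * r2m.1 + r3m.1, r3m.2)
          else (0, memo)
      (rm.1, rm.2.insert (a, b, c) rm.1))
  | _ => (0, memo)
termination_by x.toNat + y.toNat + z.toNat
decreasing_by
  · exact pvDecB1 x y z a b c hs hg
  · exact pvDecB2 x y z a b c hs hg
  · exact pvDecB3 x y z a b c hs hg hq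
  · exact pvDecB4 x y z a b c hs hg hq
  · exact pvDecB5 x y z a b c hs hg hq

-- calc_blocks of Source B
def calc_blocks_alt (size : List Int) : Int :=
  if (0 : Int) ∈ PySem.List.sorted size (fun v => v) then 0
  else
    (pvFast (pvPg (PySem.List.sorted size (fun v => v)) 0)
            (pvPg (PySem.List.sorted size (fun v => v)) 1)
            (pvPg (PySem.List.sorted size (fun v => v)) 2) PySem.Dict.empty).1

-- ===== PRECONDITION & SPEC =====
-- Pre_ excludes 0-free lists containing a negative entry (A's recursion never
-- terminates on most of them, and where a 1 is also present A's value hinges on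
-- the accidental position the negatives take after sorting — B does not
-- terminate there), and 0-free lists of fewer than three entries (A raises
-- IndexError).
def Pre_calc_blocks (size : List Int) : Prop :=
  (0 : Int) ∈ size ∨ (3 ≤ size.length ∧ ∀ x ∈ size, 0 ≤ x)
instance (size : List Int) : Decidable (Pre_calc_blocks size) := by
  unfold Pre_calc_blocks; infer_instance

def pvWitness_calc_blocks : List Int := [3, 4, 5]

def Spec_calc_blocks (size : List Int) (out : Int) : Prop := out = calc_blocks_alt size
instance (size : List Int) (out : Int) : Decidable (Spec_calc_blocks size out) := by
  unfold Spec_calc_blocks; infer_instance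

-- ===== CLAIM (what is proved, stated in full; the proofs are below) =====
def Claim_equal_calc_blocks : Prop :=
  ∀ (size : List Int), Dom_calc_blocks size → Pre_calc_blocks size →
    Spec_calc_blocks size (calc_blocks size)

-- ===== LEMMAS AND PROOFS =====

-- sorting a 3-list that is already in order is the identity
theorem pvSorted3 {a b c : Int} (hab : a ≤ b) (hbc : b ≤ c) :
    PySem.List.sorted [a, b, c] (fun v => v) = [a, b, c] := by
  apply PySem.List.sorted_eq_self_of_pairwise
  simp [List.pairwise_cons]
  exact ⟨⟨hab, le_trans hab hbc⟩, hbc⟩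

-- calc_blocks looks only at the sorted list, hence is permutation-invariant
theorem pvCalcPerm {l l' : List Int} (h : l.Perm l') : calc_blocks l = calc_blocks l' := by
  have hs : PySem.List.sorted l (fun v => v) = PySem.List.sorted l' (fun v => v) :=
    PySem.List.sorted_eq_sorted_of_perm l l' (fun v => v) (fun _ _ h => h) h
  conv_lhs => rw [calc_blocks]
  conv_rhs => rw [calc_blocks]
  rw [hs]

-- one unfolding of A on a list whose sorted form starts a :: b :: c :: …,
-- in the recursive branch
theorem pvStepGen (l : List Int) (a b c : Int) (t : List Int)
    (hs : PySem.List.sorted l (fun v => v) = a :: b :: c :: t)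
    (h0 : (0 : Int) ∉ PySem.List.sorted l (fun v => v))
    (h1 : (1 : Int) ∉ PySem.List.sorted l (fun v => v))
    (ha : 2 ≤ a) (hab : a ≤ b) (hbc : b ≤ c) :
    calc_blocks l = calc_blocks [a, a, b - a] + calc_blocks [a, b, c - a] + 1 := by
  conv_lhs => rw [calc_blocks]
  rw [if_neg h0, if_neg h1]
  rw [dif_pos (by rw [hs]; simp [pvPg0, pvPg1, pvPg2]; exact ⟨ha, hab, hbc⟩)]
  simp only [break_apart, PySem.List.sorted_sorted]
  rw [hs]
  simp only [pvPg0, pvPg1, pvPg2]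

-- one unfolding of A on an ordered triple in the recursive branch
theorem pvStep3 {a b c : Int} (ha : 2 ≤ a) (hab : a ≤ b) (hbc : b ≤ c) :
    calc_blocks [a, b, c] = calc_blocks [a, a, b - a] + calc_blocks [a, b, c - a] + 1 := by
  apply pvStepGen [a, b, c] a b c []
  · exact pvSorted3 hab hbc
  · rw [pvSorted3 hab hbc]; simp; omega
  · rw [pvSorted3 hab hbc]; simp; omega
  all_goals first | exact ha | exact hab | exact hbc

-- A on a list containing 0 returns 0
theorem pvBase0 {l : List Int} (h : (0 : Int) ∈ l) : calc_blocks l = 0 := by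
  conv_lhs => rw [calc_blocks]
  rw [if_pos (by rw [PySem.List.mem_sorted]; exact h)]

-- 3-element permutations used below
theorem pvPermB (u v w : Int) : ([u, v, w] : List Int).Perm [u, w, v] :=
  List.Perm.cons u (List.Perm.swap w v [])

theorem pvPermA (u v w : Int) : ([u, v, w] : List Int).Perm [v, w, u] :=
  (List.Perm.swap v u [w]).trans (List.Perm.cons v (List.Perm.swap w u []))

theorem pvDivSub (m a : Int) (ha : a ≠ 0) : (m - a) / a = m / a - 1 := by
  have h := Int.add_mul_ediv_right m (-1) ha
  simpa [sub_eq_add_neg] using h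

theorem pvModSub (m a : Int) : (m - a) % a = m % a := by simp

-- A on the slab [a, a, m]: m // a cubes, then the residue slab
theorem pvAAMaux (a : Int) (ha : 2 ≤ a) :
    ∀ (n : Nat) (m : Int), m.toNat ≤ n → 0 ≤ m →
      calc_blocks [a, a, m] = m / a + calc_blocks [m % a, a, a] := by
  intro n
  induction n with
  | zero =>
    intro m hn hm
    have hm0 : m = 0 := by omega
    subst hm0
    rw [pvBase0 (by simp : (0 : Int) ∈ [a, a, 0]),
        pvBase0 (by simp : (0 : Int) ∈ ((0 : Int) % a :: [a, a]))]
    simp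
  | succ n ih =>
    intro m hn hm
    by_cases hma : m < a
    · have h1 : m / a = 0 := Int.ediv_eq_zero_of_lt hm hma
      have h2 : m % a = m := Int.emod_eq_of_lt hm hma
      rw [h1, h2, zero_add]
      exact pvCalcPerm ((pvPermA a a m).trans (pvPermA a m a))
    · rw [pvStep3 ha (le_refl a) (by omega)]
      have hz : a - a = 0 := sub_self a
      rw [hz, pvBase0 (by simp : (0 : Int) ∈ [a, a, 0])]
      rw [ih (m - a) (by omega) (by omega)]
      rw [pvDivSub m a (by omega), pvModSub m a]
      omega

theorem pvAAM {a m : Int} (ha : 2 ≤ a) (hm : 0 ≤ m) :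
    calc_blocks [a, a, m] = m / a + calc_blocks [m % a, a, a] :=
  pvAAMaux a ha m.toNat m (le_refl _) hm

theorem pvPhaseAux :
    ∀ (n : Nat) (a b c : Int), (b + c).toNat ≤ n → 2 ≤ a → a ≤ b → b ≤ c →
      calc_blocks [a, b, c]
        = (b / a) * (c / a) - 1
          + (c / a - 1) * calc_blocks [b % a, a, a]
          + (b / a - 1) * calc_blocks [c % a, a, a]
          + calc_blocks [a, a + min (b % a) (c % a), a + max (b % a) (c % a)] := by
  intro n
  induction n with
  | zero => intro a b c hn ha hab hbc; exfalso; omega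
  | succ n ih =>
    intro a b c hn ha hab hbc
    have ha0 : (0 : Int) < a := by omega
    have hbm1 := Int.emod_nonneg b (by omega : a ≠ 0)
    have hbm2 := Int.emod_lt_of_pos b ha0
    have hcm1 := Int.emod_nonneg c (by omega : a ≠ 0)
    have hcm2 := Int.emod_lt_of_pos c ha0
    have hbd := Int.mul_ediv_add_emod b a
    have hcd := Int.mul_ediv_add_emod c a
    have hb1 : (1 : Int) ≤ b / a := by rw [Int.le_ediv_iff_mul_le ha0]; omega
    have hc1 : (1 : Int) ≤ c / a := by rw [Int.le_ediv_iff_mul_le ha0]; omega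
    by_cases hc2 : c < 2 * a
    · -- both b and c lie in [a, 2a): the formula is the identity
      have hqb : b / a = 1 := by
        have h2 : ¬ (2 : Int) ≤ b / a := by
          intro h
          have := mul_le_mul_of_nonneg_left h (le_of_lt ha0)
          omega
        omega
      have hqc : c / a = 1 := by
        have h2 : ¬ (2 : Int) ≤ c / a := by
          intro h
          have := mul_le_mul_of_nonneg_left h (le_of_lt ha0)
          omega
        omega
      have hmb : b % a = b - a := by rw [hqb, mul_one] at hbd; omega
      have hmc : c % a = c - a := by rw [hqc, mul_one] at hcd; omega
      rw [hqb, hqc, hmb, hmc]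
      rw [min_eq_left (by omega : b - a ≤ c - a), max_eq_right (by omega : b - a ≤ c - a)]
      rw [show a + (b - a) = b by ring, show a + (c - a) = c by ring]
      ring
    · -- one batched greedy cut
      rw [pvStep3 ha hab hbc]
      rw [pvAAM ha (by omega : (0 : Int) ≤ b - a)]
      rw [pvDivSub b a (by omega), pvModSub b a]
      rcases le_total b (c - a) with hcase | hcase
      · rw [ih a b (c - a) (by omega) ha hab hcase]
        rw [pvDivSub c a (by omega), pvModSub c a]
        ring
      · rw [pvCalcPerm (pvPermB a b (c - a))]
        rw [ih a (c - a) b (by omega) ha (by omega) hcase]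
        rw [pvDivSub c a (by omega), pvModSub c a]
        rw [min_comm ((c : Int) % a) (b % a), max_comm ((c : Int) % a) (b % a)]
        ring

-- the batched phase: A's value on an ordered triple with cube side a
theorem pvPhase {a b c : Int} (ha : 2 ≤ a) (hab : a ≤ b) (hbc : b ≤ c) :
    calc_blocks [a, b, c]
      = (b / a) * (c / a) - 1
        + (c / a - 1) * calc_blocks [b % a, a, a]
        + (b / a - 1) * calc_blocks [c % a, a, a]
        + calc_blocks [a, a + min (b % a) (c % a), a + max (b % a) (c % a)] :=
  pvPhaseAux (b + c).toNat a b c (le_refl _) ha hab hbc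

theorem pvExists3 (l : List Int) (h : l.length = 3) : ∃ a b c : Int, l = [a, b, c] := by
  match l, h with
  | [a, b, c], _ => exact ⟨a, b, c, rfl⟩

-- the memo invariant: every stored value is A's value at its key
def pvInv (d : PySem.Dict (Int × Int × Int) Int) : Prop :=
  ∀ k v, d.get? k = some v → v = calc_blocks [k.1, k.2.1, k.2.2]

-- A on the plane [1, b, c]
theorem pvBase1 {b c : Int} (h1b : 1 ≤ b) (hbc : b ≤ c) : calc_blocks [1, b, c] = b * c := by
  conv_lhs => rw [calc_blocks]
  rw [pvSorted3 h1b hbc]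
  rw [if_neg (by simp; omega), if_pos (by simp)]
  rw [pvPg1, pvPg2]

-- inserting a correct value keeps the memo invariant
theorem pvInvInsert {d : PySem.Dict (Int × Int × Int) Int} (hinv : pvInv d)
    {k : Int × Int × Int} {v : Int} (hv : v = calc_blocks [k.1, k.2.1, k.2.2]) :
    pvInv (d.insert k v) := by
  intro k' v' h
  rw [PySem.Dict.get?_insert] at h
  split at h
  · rename_i hk
    subst hk
    cases h
    exact hv
  · exact hinv k' v' h

-- B's core equals A on nonnegative triples, and preserves the memo invariant
theorem pvFastCorrect : ∀ (n : Nat) (x y z : Int) (memo : PySem.Dict (Int × Int × Int) Int),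
    x.toNat + y.toNat + z.toNat ≤ n → 0 ≤ x → 0 ≤ y → 0 ≤ z → pvInv memo →
    (pvFast x y z memo).1 = calc_blocks [x, y, z] ∧ pvInv (pvFast x y z memo).2 := by
  intro n
  induction n using Nat.strong_induction_on with
  | _ n ih =>
    intro x y z memo hn hx hy hz hinv
    obtain ⟨a, b, c, hs⟩ := pvExists3 (PySem.List.sorted [x, y, z] (fun v => v))
      (by rw [PySem.List.length_sorted]; rfl)
    have hperm : ([a, b, c] : List Int).Perm [x, y, z] :=
      hs ▸ PySem.List.sorted_perm [x, y, z] (fun v => v) false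
    have hpw := PySem.List.sorted_pairwise [x, y, z] (fun v => v)
    rw [hs] at hpw
    rw [List.pairwise_cons] at hpw
    obtain ⟨hp1, hpw2⟩ := hpw
    rw [List.pairwise_cons] at hpw2
    obtain ⟨hp2, _⟩ := hpw2
    have hab : a ≤ b := hp1 b (by simp)
    have hbc : b ≤ c := hp2 c (by simp)
    have hmem : ∀ w ∈ ([a, b, c] : List Int), 0 ≤ w := by
      intro w hw
      have := hperm.subset hw
      simp at this
      rcases this with h | h | h <;> omega
    have ha0 : 0 ≤ a := hmem a (by simp)
    have hb0 : 0 ≤ b := hmem b (by simp)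
    have hc0 : 0 ≤ c := hmem c (by simp)
    have hsum : a.toNat + b.toNat + c.toNat = x.toNat + y.toNat + z.toNat := by
      have := (hperm.map Int.toNat).sum_eq
      simp at this
      omega
    have hcalc : calc_blocks [x, y, z] = calc_blocks [a, b, c] := pvCalcPerm hperm.symm
    rw [pvFast]
    split
    next a' b' c' heq =>
      rw [hs] at heq
      injection heq with e1 heq
      injection heq with e2 heq
      injection heq with e3 _
      subst e1; subst e2; subst e3
      cases hget : memo.get? (a, b, c) with
      | some v =>
        simp only [hget]
        refine ⟨?_, hinv⟩
        rw [hcalc]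
        simpa using hinv (a, b, c) v hget
      | none =>
        simp only [hget]
        rw [hcalc]
        by_cases hA0 : a = 0
        · subst hA0
          simp only [if_pos rfl]
          refine ⟨by simp [pvBase0 (by simp : (0:Int) ∈ [0, b, c])], ?_⟩
          apply pvInvInsert hinv
          simp [pvBase0 (by simp : (0:Int) ∈ [0, b, c])]
        · rw [if_neg hA0]
          by_cases hA1 : a = 1
          · subst hA1
            simp only [if_pos rfl]
            refine ⟨by simp [pvBase1 hab hbc], ?_⟩
            apply pvInvInsert hinv
            simp [pvBase1 hab hbc]
          · rw [if_neg hA1]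
            have ha2 : 2 ≤ a := by omega
            have ha0' : (0 : Int) < a := by omega
            rw [dif_pos ⟨ha2, hab, hbc⟩]
            simp only [PySem.Int.floordiv_eq_ediv_of_pos ha0',
              PySem.Int.mod_eq_emod_of_pos ha0']
            have hbm1 := Int.emod_nonneg b (by omega : a ≠ 0)
            have hbm2 := Int.emod_lt_of_pos b ha0'
            have hcm1 := Int.emod_nonneg c (by omega : a ≠ 0)
            have hcm2 := Int.emod_lt_of_pos c ha0'
            have hbd := Int.mul_ediv_add_emod b a
            have hcd := Int.mul_ediv_add_emod c a
            have hb1 : (1 : Int) ≤ b / a := by rw [Int.le_ediv_iff_mul_le ha0']; omega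
            have hc1 : (1 : Int) ≤ c / a := by rw [Int.le_ediv_iff_mul_le ha0']; omega
            have hba : a * 1 ≤ a * (b / a) := mul_le_mul_of_nonneg_left hb1 (le_of_lt ha0')
            by_cases hq : c / a = 1
            · rw [dif_pos hq]
              obtain ⟨hv1, hi1⟩ := ih (n - 1) (by omega) (b - a) a a memo (by omega)
                (by omega) (by omega) (by omega) hinv
              obtain ⟨hv2, hi2⟩ := ih (n - 1) (by omega) (c - a) a b _ (by omega)
                (by omega) (by omega) (by omega) hi1
              have e1 : calc_blocks [b - a, a, a] = calc_blocks [a, a, b - a] :=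
                pvCalcPerm (pvPermA (b - a) a a)
              have e2 : calc_blocks [c - a, a, b] = calc_blocks [a, b, c - a] :=
                pvCalcPerm (pvPermA (c - a) a b)
              have hval : 1 + (pvFast (b - a) a a memo).1
                    + (pvFast (c - a) a b (pvFast (b - a) a a memo).2).1
                  = calc_blocks [a, b, c] := by
                rw [hv1, hv2, e1, e2, pvStep3 ha2 hab hbc]
                ring
              refine ⟨by simpa using hval, ?_⟩
              apply pvInvInsert hi2
              simpa using hval
            · rw [dif_neg hq]
              have hq2 : (2 : Int) ≤ c / a := by omega
              have hca : a * 2 ≤ a * (c / a) := mul_le_mul_of_nonneg_left hq2 (le_of_lt ha0')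
              obtain ⟨hv1, hi1⟩ := ih (n - 1) (by omega) (b % a) a a memo (by omega)
                (by omega) (by omega) (by omega) hinv
              obtain ⟨hv2, hi2⟩ := ih (n - 1) (by omega) (c % a) a a _ (by omega)
                (by omega) (by omega) (by omega) hi1
              obtain ⟨hv3, hi3⟩ := ih (n - 1) (by omega) a (a + min (b % a) (c % a))
                (a + max (b % a) (c % a)) _ (by omega)
                (by omega) (by omega) (by omega) hi2
              have e1 : calc_blocks [b % a, a, a] = calc_blocks [a, a, b % a] :=
                pvCalcPerm (pvPermA (b % a) a a)
              have e2 : calc_blocks [c % a, a, a] = calc_blocks [a, a, c % a] :=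
                pvCalcPerm (pvPermA (c % a) a a)
              have hval : b / a * (c / a) - 1
                    + (c / a - 1) * (pvFast (b % a) a a memo).1
                    + (b / a - 1) * (pvFast (c % a) a a (pvFast (b % a) a a memo).2).1
                    + (pvFast a (a + min (b % a) (c % a)) (a + max (b % a) (c % a))
                        (pvFast (c % a) a a (pvFast (b % a) a a memo).2).2).1
                  = calc_blocks [a, b, c] := by
                rw [hv1, hv2, hv3, pvPhase ha2 hab hbc]
              refine ⟨by simpa using hval, ?_⟩
              apply pvInvInsert hi3
              simpa using hval
    next h2 =>
      exact absurd hs (h2 a b c)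

theorem pvExistsCons3 (l : List Int) (h : 3 ≤ l.length) :
    ∃ (a b c : Int) (t : List Int), l = a :: b :: c :: t := by
  match l, h with
  | a :: b :: c :: t, _ => exact ⟨a, b, c, t, rfl⟩

-- the empty dict satisfies the memo invariant
theorem pvInvEmpty : pvInv PySem.Dict.empty := by
  intro k v h
  simp [PySem.Dict.empty, PySem.Dict.get?] at h

-- ===== VERDICT (by name: the statement is the Claim_ definition above) =====
theorem calc_blocks_spec : Claim_equal_calc_blocks := by
  intro size hdom hpre
  unfold Spec_calc_blocks
  by_cases h0 : (0 : Int) ∈ PySem.List.sorted size (fun v => v)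
  · conv_lhs => rw [calc_blocks]
    rw [if_pos h0, calc_blocks_alt, if_pos h0]
  · have hpre' : 3 ≤ size.length ∧ ∀ x ∈ size, 0 ≤ x := by
      rcases hpre with h | h
      · exact absurd ((PySem.List.mem_sorted size (fun v => v) false 0).mpr h) h0
      · exact h
    obtain ⟨hlen, hnn⟩ := hpre'
    obtain ⟨a, b, c, t, hs⟩ := pvExistsCons3 (PySem.List.sorted size (fun v => v))
      (by rw [PySem.List.length_sorted]; exact hlen)
    have hpw := PySem.List.sorted_pairwise size (fun v => v)
    rw [hs, List.pairwise_cons] at hpw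
    obtain ⟨hp1, hpw2⟩ := hpw
    rw [List.pairwise_cons] at hpw2
    obtain ⟨hp2, _⟩ := hpw2
    have hab : a ≤ b := hp1 b (by simp)
    have hbc : b ≤ c := hp2 c (by simp)
    have hnns : ∀ w ∈ PySem.List.sorted size (fun v => v), 0 ≤ w := fun w hw =>
      hnn w ((PySem.List.mem_sorted size (fun v => v) false w).mp hw)
    have ha0 : 0 ≤ a := hnns a (by rw [hs]; simp)
    have hb0 : 0 ≤ b := hnns b (by rw [hs]; simp)
    have hc0 : 0 ≤ c := hnns c (by rw [hs]; simp)
    have haS : a ∈ PySem.List.sorted size (fun v => v) := by rw [hs]; simp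
    have haZ : a ≠ 0 := fun h => h0 (h ▸ haS)
    have hBalt : calc_blocks_alt size = (pvFast a b c PySem.Dict.empty).1 := by
      rw [calc_blocks_alt, if_neg h0, hs, pvPg0, pvPg1, pvPg2]
    have hB := (pvFastCorrect (a.toNat + b.toNat + c.toNat) a b c PySem.Dict.empty
      (le_refl _) ha0 hb0 hc0 pvInvEmpty).1
    by_cases h1 : (1 : Int) ∈ PySem.List.sorted size (fun v => v)
    · have haeq : a = 1 := by
        rw [hs] at h1
        rcases List.mem_cons.mp h1 with h | h
        · omega
        · have := hp1 1 h
          omega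
      conv_lhs => rw [calc_blocks]
      rw [if_neg h0, if_pos h1, hs, pvPg1, pvPg2]
      rw [hBalt, hB]
      subst haeq
      rw [pvBase1 (by omega) hbc]
    · have ha2 : 2 ≤ a := by
        have : a ≠ 1 := fun h => h1 (h ▸ haS)
        omega
      rw [pvStepGen size a b c t hs h0 h1 ha2 hab hbc]
      rw [hBalt, hB, pvStep3 ha2 hab hbc]
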